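-- pv_equiv track=rewrite | github.com/qhjqhj00/acl2024_cfic | src/cfic_decoding.py | expand_sent
-- ===== SOURCE A (Python) =====
-- def expand_sent(sent, all_sents, expand_size):
--     length = len(sent.split())
--     sent_idx = all_sents.index(sent)
--     rtn = [sent]
--     for tmp_sent in all_sents[sent_idx+1:]:
--         tmp_length = len(tmp_sent.split())
--         if length+tmp_length > expand_size:
--             break
--         else:
--             rtn.append(tmp_sent)
--             length+=tmp_length
--     return rtn
-- ===== SOURCE B (Python) =====
-- def expand_sent(sent, all_sents, expand_size):
--     sent_idx = all_sents.index(sent)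
--     tail = all_sents[sent_idx + 1:]
--     # prefix table: cumsum[i] = word count of sent plus word counts of tail[0..i]
--     total = len(sent.split())
--     cumsum = []
--     for s in tail:
--         total += len(s.split())
--         cumsum.append(total)
--     # binary search for the number of cumulative sums <= expand_size
--     lo, hi = 0, len(cumsum)
--     while lo < hi:
--         mid = (lo + hi) // 2
--         if cumsum[mid] <= expand_size:
--             lo = mid + 1
--         else:
--             hi = mid
--     return [sent] + tail[:lo]
-- ===== Notes on version B (the rewrite author's own statement) =====
-- stated objective: alternative
-- what changed: Replaces the incremental accumulate-and-break loop with a prefix-sum table over the tail plus a hand-written bisect_right binary search on that nondecreasing table to find how many tail sentences fit.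
-- outside the precondition, e.g. on expand_sent('x', ['a b'], 5): A raises ValueError, B raises ValueError
import Mathlib
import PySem

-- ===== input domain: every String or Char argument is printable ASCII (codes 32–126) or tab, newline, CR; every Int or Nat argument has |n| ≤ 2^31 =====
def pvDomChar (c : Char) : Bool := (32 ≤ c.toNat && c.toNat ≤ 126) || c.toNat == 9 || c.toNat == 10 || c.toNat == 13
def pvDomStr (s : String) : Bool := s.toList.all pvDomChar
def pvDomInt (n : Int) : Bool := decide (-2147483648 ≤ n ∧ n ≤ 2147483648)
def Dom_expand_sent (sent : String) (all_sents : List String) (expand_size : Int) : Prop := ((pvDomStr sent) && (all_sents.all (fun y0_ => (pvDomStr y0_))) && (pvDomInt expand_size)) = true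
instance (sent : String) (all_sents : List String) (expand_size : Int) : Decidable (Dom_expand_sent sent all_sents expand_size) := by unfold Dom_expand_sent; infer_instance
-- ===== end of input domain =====

-- B replaces A's accumulate-and-break loop by a prefix-sum table plus a binary-search
-- (bisect_right) boundary lookup; alternative decomposition, same asymptotic cost.

-- ===== PORT A =====
-- the 'for tmp_sent in …' loop with its running 'length' accumulator and 'break'
def pvLoopA (e : Int) : Int → List String → List String
  | _, [] => []
  | length, t :: ts =>
    let tl : Int := ((PySem.Str.split₀ t).length : Int)
    if length + tl > e then [] else t :: pvLoopA e (length + tl) ts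

def expand_sent (sent : String) (all_sents : List String) (expand_size : Int) : List String :=
  match PySem.List.index? all_sents sent with
  | none => []   -- Python raises ValueError here; excluded by Pre_expand_sent
  | some sent_idx =>
      let length : Int := ((PySem.Str.split₀ sent).length : Int)
      sent :: pvLoopA expand_size length
        (PySem.List.slice all_sents (some ((sent_idx : Int) + 1)) none)

-- ===== PORT B =====
-- the prefix-sum table: pvCum total ts = the Python 'cumsum' list built from 'total'
def pvCum (total : Int) : List String → List Int
  | [] => []
  | s :: ss =>
      let t := total + ((PySem.Str.split₀ s).length : Int)
      t :: pvCum t ss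

-- the hand-written bisect_right loop of Source B
def pvBisect (xs : List Int) (e : Int) (lo hi : Nat) : Nat :=
  if _h : lo < hi then
    -- mid = (lo + hi) // 2, inlined
    if xs.getD ((lo + hi) / 2) 0 ≤ e then pvBisect xs e ((lo + hi) / 2 + 1) hi
    else pvBisect xs e lo ((lo + hi) / 2)
  else lo
termination_by hi - lo
decreasing_by all_goals omega

def expand_sent_alt (sent : String) (all_sents : List String) (expand_size : Int) : List String :=
  match PySem.List.index? all_sents sent with
  | none => []   -- Python raises ValueError here; excluded by Pre_expand_sent
  | some sent_idx =>
      let tail := PySem.List.slice all_sents (some ((sent_idx : Int) + 1)) none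
      let cumsum := pvCum ((PySem.Str.split₀ sent).length : Int) tail
      let lo := pvBisect cumsum expand_size 0 cumsum.length
      sent :: tail.take lo

-- ===== PRECONDITION & SPEC =====
-- Pre_ excludes exactly the inputs where Python's list.index raises ValueError
def Pre_expand_sent (sent : String) (all_sents : List String) (expand_size : Int) : Prop :=
  sent ∈ all_sents
instance (sent : String) (all_sents : List String) (expand_size : Int) : Decidable (Pre_expand_sent sent all_sents expand_size) := by unfold Pre_expand_sent; infer_instance

def pvWitness_expand_sent : String × List String × Int := ("a b", ["a b", "c d", "e"], 3)

def Spec_expand_sent (sent : String) (all_sents : List String) (expand_size : Int) (out : List String) : Prop := out = expand_sent_alt sent all_sents expand_size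
instance (sent : String) (all_sents : List String) (expand_size : Int) (out : List String) : Decidable (Spec_expand_sent sent all_sents expand_size out) := by unfold Spec_expand_sent; infer_instance

-- ===== CLAIM (what is proved, stated in full; the proofs are below) =====
def Claim_equal_expand_sent : Prop := ∀ (sent : String) (all_sents : List String) (expand_size : Int), Dom_expand_sent sent all_sents expand_size → Pre_expand_sent sent all_sents expand_size → Spec_expand_sent sent all_sents expand_size (expand_sent sent all_sents expand_size)

-- ===== LEMMAS AND PROOFS =====

-- A's loop returns the prefix of ts whose length is the takeWhile-boundary of the prefix sums
theorem pvLoopA_eq_take (e : Int) (acc : Int) (ts : List String) :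
    pvLoopA e acc ts =
      ts.take ((pvCum acc ts).takeWhile (fun c => decide (c ≤ e))).length := by
  induction ts generalizing acc with
  | nil => rfl
  | cons t ts ih =>
      simp only [pvLoopA, pvCum, List.takeWhile]
      by_cases h : acc + ((PySem.Str.split₀ t).length : Int) ≤ e
      · simp [h, not_lt.mpr h, ih]
      · simp [h, lt_of_not_ge h]

theorem pvCum_le_mem (total x : Int) (ts : List String) (hx : x ∈ pvCum total ts) :
    total ≤ x := by
  induction ts generalizing total with
  | nil => simp [pvCum] at hx
  | cons s ss ih =>
      simp only [pvCum, List.mem_cons] at hx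
      rcases hx with h | h
      · omega
      · have := ih _ h
        omega

-- the prefix-sum table is nondecreasing (word counts are ≥ 0)
theorem pvCum_mono (total : Int) (ts : List String) (i j : Nat) (hij : i ≤ j)
    (hj : j < (pvCum total ts).length) :
    (pvCum total ts).getD i 0 ≤ (pvCum total ts).getD j 0 := by
  induction ts generalizing total i j with
  | nil => simp [pvCum] at hj
  | cons s ss ih =>
      simp only [pvCum] at hj ⊢
      match i, j with
      | 0, 0 => simp
      | 0, j + 1 =>
          simp only [List.getD_cons_zero, List.getD_cons_succ]
          simp only [List.length_cons] at hj
          have hjlen : j < (pvCum (total + ((PySem.Str.split₀ s).length : Int)) ss).length := by omega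
          have hmem : (pvCum (total + ((PySem.Str.split₀ s).length : Int)) ss).getD j 0
              ∈ pvCum (total + ((PySem.Str.split₀ s).length : Int)) ss := by
            rw [List.getD_eq_getElem _ _ hjlen]
            exact List.getElem_mem hjlen
          have := pvCum_le_mem _ _ _ hmem
          omega
      | i + 1, j + 1 =>
          simp only [List.getD_cons_succ]
          simp only [List.length_cons] at hj
          exact ih _ i j (by omega) (by omega)

theorem tw_le (p : Int → Bool) (xs : List Int) : (xs.takeWhile p).length ≤ xs.length := by
  induction xs with
  | nil => simp
  | cons x xs ih =>
      simp only [List.takeWhile]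
      by_cases hp : p x
      · simp only [hp, List.length_cons]
        omega
      · simp [hp]

theorem tw_lt (p : Int → Bool) (xs : List Int) (i : Nat)
    (h : i < (xs.takeWhile p).length) : p (xs.getD i 0) = true := by
  induction xs generalizing i with
  | nil => simp at h
  | cons x xs ih =>
      simp only [List.takeWhile] at h
      by_cases hp : p x
      · simp only [hp, List.length_cons] at h
        match i with
        | 0 => simpa using hp
        | i + 1 => exact ih i (by omega)
      · simp [hp] at h

theorem tw_stop (p : Int → Bool) (xs : List Int)
    (h : (xs.takeWhile p).length < xs.length) :
    p (xs.getD (xs.takeWhile p).length 0) = false := by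
  induction xs with
  | nil => simp at h
  | cons x xs ih =>
      simp only [List.takeWhile] at h ⊢
      by_cases hp : p x
      · simp only [hp, List.length_cons] at h ⊢
        exact ih (by omega)
      · simp [hp]

-- bisect_right on a nondecreasing table finds the takeWhile boundary
theorem pvBisect_eq (xs : List Int) (e : Int)
    (mono : ∀ i j, i ≤ j → j < xs.length → xs.getD i 0 ≤ xs.getD j 0)
    (lo hi : Nat) (h1 : lo ≤ hi) (h2 : hi ≤ xs.length)
    (hlo : ∀ i, i < lo → xs.getD i 0 ≤ e)
    (hhi : ∀ i, hi ≤ i → i < xs.length → ¬ xs.getD i 0 ≤ e) :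
    pvBisect xs e lo hi = (xs.takeWhile (fun c => decide (c ≤ e))).length := by
  rw [pvBisect]
  split
  · rename_i hlt
    split
    · rename_i hmid
      exact pvBisect_eq xs e mono ((lo + hi) / 2 + 1) hi (by omega) h2
        (fun i hi' => le_trans (mono i ((lo + hi) / 2) (by omega) (by omega)) hmid) hhi
    · rename_i hmid
      exact pvBisect_eq xs e mono lo ((lo + hi) / 2) (by omega) (by omega) hlo
        (fun i hge hilt h => hmid (le_trans (mono ((lo + hi) / 2) i hge hilt) h))
  · rename_i hnlt
    have heq : lo = hi := by omega
    subst heq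
    set t := (xs.takeWhile (fun c => decide (c ≤ e))).length with ht
    have htle : t ≤ xs.length := tw_le _ xs
    rcases Nat.lt_trichotomy lo t with h | h | h
    · have := tw_lt (fun c => decide (c ≤ e)) xs lo h
      simp only [decide_eq_true_eq] at this
      exact absurd this (hhi lo (le_refl lo) (by omega))
    · exact h
    · have := tw_stop (fun c => decide (c ≤ e)) xs (by omega)
      simp only [decide_eq_false_iff_not] at this
      exact absurd (hlo t h) this
termination_by hi - lo
decreasing_by all_goals omega

-- ===== VERDICT (by name: the statement is the Claim_ definition above) =====
theorem expand_sent_spec : Claim_equal_expand_sent := by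
  intro sent all_sents expand_size _hdom hpre
  unfold Spec_expand_sent expand_sent expand_sent_alt
  cases hidx : PySem.List.index? all_sents sent with
  | none =>
      exact absurd hpre ((PySem.List.index?_eq_none_iff _ _).mp hidx)
  | some sent_idx =>
      simp only [List.cons.injEq, true_and]
      rw [pvLoopA_eq_take]
      congr 1
      exact (pvBisect_eq _ expand_size
        (pvCum_mono _ _) 0 _ (Nat.zero_le _) (le_refl _)
        (fun i h => absurd h (Nat.not_lt_zero i))
        (fun i h1 h2 _ => absurd h2 (by omega))).symm
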